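-- pv_equiv track=rewrite | github.com/angelesc03/Genetic-Algorithms | Problema asignación de tareas/clase/NSGAII.py | dominancia_pareto
-- ===== SOURCE A (Python) =====
-- def dominancia_pareto(U, V, modo="minimize"):
--     """
--     Determina la relación de dominancia entre dos vectores U y V.
--
--     Args:
--     - U (list): Vector n-dimensional.
--     - V (list): Vector n-dimensional (mismo tamaño que U).
--     - modo (str): "minimize" o "maximize".
--
--     Returns:
--     - 1 si U domina a V.
--     - 2 si V domina a U.
--     - 3 si ninguno domina al otro.
--     """
--     if len(U) != len(V):
--         raise ValueError("Los vectores U y V deben tener la misma longitud.")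
--
--     if modo not in ["minimize", "maximize"]:
--         raise ValueError("El modo debe ser 'minimize' para minimización o 'maximize' para maximización.")
--
--     if modo == "minimize":
--         u_domina_v = all(u <= v for u, v in zip(U, V)) and any(u < v for u, v in zip(U, V))
--         v_domina_u = all(v <= u for v, u in zip(V, U)) and any(v < u for v, u in zip(V, U))
--     else:
--         u_domina_v = all(u >= v for u, v in zip(U, V)) and any(u > v for u, v in zip(U, V))
--         v_domina_u = all(v >= u for v, u in zip(V, U)) and any(v > u for v, u in zip(V, U))
--
--     if u_domina_v:
--         return 1
--     elif v_domina_u: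
--         return 2
--     else:
--         return 3
-- ===== SOURCE B (Python) =====
-- def dominancia_pareto(U, V, modo="minimize"):
--     if len(U) != len(V):
--         raise ValueError("Los vectores U y V deben tener la misma longitud.")
--     if modo not in ["minimize", "maximize"]:
--         raise ValueError("El modo debe ser 'minimize' para minimización o 'maximize' para maximización.")
--     def mejor(a, b):
--         return a < b if modo == "minimize" else b < a
--     u_mejor = False
--     v_mejor = False
--     for u, v in zip(U, V):
--         if mejor(u, v):
--             u_mejor = True
--         elif mejor(v, u):
--             v_mejor = True
--     if u_mejor and not v_mejor:
--         return 1
--     if v_mejor and not u_mejor: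
--         return 2
--     return 3
-- ===== Notes on version B (the rewrite author's own statement) =====
-- stated objective: simpler
-- what changed: Replaces the four separate all/any comprehension scans over zip(U,V) with a single pass maintaining two flags (some coordinate strictly better for U / for V), from which dominance is read off.
import Mathlib
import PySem

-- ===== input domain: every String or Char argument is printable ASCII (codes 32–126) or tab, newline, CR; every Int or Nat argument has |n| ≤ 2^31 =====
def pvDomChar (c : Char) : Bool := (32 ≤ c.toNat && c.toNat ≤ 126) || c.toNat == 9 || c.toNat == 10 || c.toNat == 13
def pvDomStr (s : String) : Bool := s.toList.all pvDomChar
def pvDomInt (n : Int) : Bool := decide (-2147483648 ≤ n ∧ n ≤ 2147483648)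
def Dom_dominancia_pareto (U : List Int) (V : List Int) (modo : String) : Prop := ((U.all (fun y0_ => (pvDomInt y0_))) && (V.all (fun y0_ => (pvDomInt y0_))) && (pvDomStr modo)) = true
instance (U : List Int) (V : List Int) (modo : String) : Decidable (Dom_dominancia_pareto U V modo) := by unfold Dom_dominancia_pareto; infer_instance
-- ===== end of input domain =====

-- B replaces A's four all/any scans over zip(U,V) with one pass keeping two 'strictly better somewhere' flags (objective: simpler); A raises ValueError on unequal lengths or an unknown modo — those inputs are outside Pre_.


-- ===== PORT A =====
-- A's two ValueError guards are excluded by Pre_; the all/any comprehensions over zip are ported literally.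
def dominancia_pareto (U : List Int) (V : List Int) (modo : String) : Int :=
  if modo = "minimize" then
    let u_domina_v := ((U.zip V).all fun p => decide (p.1 ≤ p.2)) && ((U.zip V).any fun p => decide (p.1 < p.2))
    let v_domina_u := ((V.zip U).all fun p => decide (p.1 ≤ p.2)) && ((V.zip U).any fun p => decide (p.1 < p.2))
    if u_domina_v then 1 else if v_domina_u then 2 else 3
  else
    let u_domina_v := ((U.zip V).all fun p => decide (p.1 ≥ p.2)) && ((U.zip V).any fun p => decide (p.1 > p.2))
    let v_domina_u := ((V.zip U).all fun p => decide (p.1 ≥ p.2)) && ((V.zip U).any fun p => decide (p.1 > p.2))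
    if u_domina_v then 1 else if v_domina_u then 2 else 3

-- ===== PORT B =====
-- single pass with two flags, as in Source B
def dpLoop (mejor : Int → Int → Bool) : List (Int × Int) → Bool → Bool → Bool × Bool
  | [], um, vm => (um, vm)
  | (u, v) :: rest, um, vm =>
      if mejor u v then dpLoop mejor rest true vm
      else if mejor v u then dpLoop mejor rest um true
      else dpLoop mejor rest um vm

def dominancia_pareto_alt (U : List Int) (V : List Int) (modo : String) : Int :=
  let mejor : Int → Int → Bool :=
    if modo = "minimize" then fun a b => decide (a < b) else fun a b => decide (b < a)
  let r := dpLoop mejor (U.zip V) false false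
  if r.1 && !r.2 then 1 else if r.2 && !r.1 then 2 else 3

-- ===== PRECONDITION & SPEC =====
-- Pre_ excludes exactly the inputs on which A raises ValueError: unequal lengths, or a modo other than "minimize"/"maximize".
def Pre_dominancia_pareto (U : List Int) (V : List Int) (modo : String) : Prop :=
  U.length = V.length ∧ (modo = "minimize" ∨ modo = "maximize")
instance (U : List Int) (V : List Int) (modo : String) : Decidable (Pre_dominancia_pareto U V modo) := by unfold Pre_dominancia_pareto; infer_instance
def pvWitness_dominancia_pareto : List Int × List Int × String := ([1, 2], [1, 3], "minimize")

def Spec_dominancia_pareto (U : List Int) (V : List Int) (modo : String) (out : Int) : Prop := out = dominancia_pareto_alt U V modo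
instance (U : List Int) (V : List Int) (modo : String) (out : Int) : Decidable (Spec_dominancia_pareto U V modo out) := by unfold Spec_dominancia_pareto; infer_instance

-- ===== CLAIM (what is proved, stated in full; the proofs are below) =====
def Claim_equal_dominancia_pareto : Prop := ∀ (U : List Int) (V : List Int) (modo : String), Dom_dominancia_pareto U V modo → Pre_dominancia_pareto U V modo → Spec_dominancia_pareto U V modo (dominancia_pareto U V modo)

-- ===== LEMMAS AND PROOFS =====

-- the loop's flags: first = initial flag or some pair with mejor p.1 p.2; second = initial or some pair where the elif fired
theorem dpLoop_eq (mejor : Int → Int → Bool) (L : List (Int × Int)) (um vm : Bool) :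
    dpLoop mejor L um vm =
      (um || L.any (fun p => mejor p.1 p.2),
       vm || L.any (fun p => !mejor p.1 p.2 && mejor p.2 p.1)) := by
  induction L generalizing um vm with
  | nil => simp [dpLoop]
  | cons h t ih =>
      obtain ⟨u, v⟩ := h
      simp only [dpLoop]
      by_cases h1 : mejor u v
      · simp [h1, ih]
      · by_cases h2 : mejor v u <;> simp [h1, h2, ih]

theorem dec_not_and (a b : Int) : (!decide (a < b) && decide (b < a)) = decide (b < a) := by
  by_cases h : b < a
  · have : ¬ a < b := by omega
    simp [h, this]
  · simp [h]

theorem any_asym (L : List (Int × Int)) :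
    (L.any fun p => !decide (p.1 < p.2) && decide (p.2 < p.1)) = (L.any fun p => decide (p.2 < p.1)) := by
  induction L with
  | nil => rfl
  | cons h t ih => simp [dec_not_and]

theorem any_asym' (L : List (Int × Int)) :
    (L.any fun p => !decide (p.2 < p.1) && decide (p.1 < p.2)) = (L.any fun p => decide (p.1 < p.2)) := by
  induction L with
  | nil => rfl
  | cons h t ih => simp [dec_not_and]

theorem any_zip_swap (f : Int → Int → Bool) (L L' : List Int) :
    (L.zip L').any (fun p => f p.1 p.2) = (L'.zip L).any (fun p => f p.2 p.1) := by
  induction L generalizing L' with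
  | nil => cases L' <;> rfl
  | cons x t ih => cases L' with
      | nil => rfl
      | cons y t' => simp [ih]

theorem dec_le_not_lt (a b : Int) : decide (a ≤ b) = !decide (b < a) := by
  by_cases h : b < a
  · have : ¬ a ≤ b := by omega
    simp [h, this]
  · have : a ≤ b := by omega
    simp [h, this]

theorem all_le_eq (L : List (Int × Int)) :
    (L.all fun p => decide (p.1 ≤ p.2)) = !(L.any fun p => decide (p.2 < p.1)) := by
  induction L with
  | nil => rfl
  | cons h t ih => rw [List.all_cons, List.any_cons, ih, dec_le_not_lt h.1 h.2, Bool.not_or]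

theorem all_le_eq' (L : List (Int × Int)) :
    (L.all fun p => decide (p.2 ≤ p.1)) = !(L.any fun p => decide (p.1 < p.2)) := by
  induction L with
  | nil => rfl
  | cons h t ih => rw [List.all_cons, List.any_cons, ih, dec_le_not_lt h.2 h.1, Bool.not_or]

-- ===== VERDICT (by name: the statement is the Claim_ definition above) =====
theorem dominancia_pareto_spec : Claim_equal_dominancia_pareto := by
  intro U V modo _ hpre
  unfold Spec_dominancia_pareto dominancia_pareto dominancia_pareto_alt
  rcases hpre.2 with hm | hm <;> subst hm <;>
    simp only [String.reduceEq, reduceIte, ge_iff_le, gt_iff_lt, dpLoop_eq, Bool.false_or]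
  · simp only [any_asym, all_le_eq]
    rw [any_zip_swap (fun a b => decide (a < b)) V U,
        any_zip_swap (fun a b => decide (b < a)) V U]
    cases h1 : (U.zip V).any fun p => decide (p.1 < p.2) <;>
      cases h2 : (U.zip V).any fun p => decide (p.2 < p.1) <;> simp
  · rw [any_asym' (U.zip V)]
    simp only [all_le_eq']
    rw [any_zip_swap (fun a b => decide (b < a)) V U,
        any_zip_swap (fun a b => decide (a < b)) V U]
    cases h1 : (U.zip V).any fun p => decide (p.1 < p.2) <;>
      cases h2 : (U.zip V).any fun p => decide (p.2 < p.1) <;> simp
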